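-- pv_equiv track=rewrite | github.com/Yuktesha/prime-phone-finder_tw | 連續質數相加後仍為質數v1.py | find_prime_sums
-- ===== SOURCE A (Python) =====
-- def is_prime(n):
--     """判斷一個數是否為質數"""
--     if n < 2:
--         return False
--     for i in range(2, int(n ** 0.5) + 1):
--         if n % i == 0:
--             return False
--     return True
--
-- def find_prime_sums(limit, min_length=1, max_length=None):
--     """找出所有小於limit的連續質數相加為質數的組合"""
--     primes = [n for n in range(2, limit) if is_prime(n)]
--     results = []
--
--     for start in range(len(primes)):
--         current_sum = 0
--         for end in range(start, len(primes)):
--             current_sum += primes[end]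
--             if current_sum >= limit:
--                 break
--             length = end - start + 1
--             if length < min_length:
--                 continue
--             if max_length and length > max_length:
--                 break
--             if is_prime(current_sum):
--                 results.append((primes[start:end+1], current_sum))
--
--     return results
-- ===== SOURCE B (Python) =====
-- def is_prime(n):
--     """same module helper as A: trial division up to isqrt(n)"""
--     if n < 2:
--         return False
--     for i in range(2, int(n ** 0.5) + 1):
--         if n % i == 0:
--             return False
--     return True
--
-- def find_prime_sums(limit, min_length=1, max_length=None):
--     primes = [n for n in range(2, limit) if is_prime(n)]
--     prime_set = set(primes)          # a prime sum < limit is exactly a member of primes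
--     prefix = [0]
--     for p in primes:
--         prefix.append(prefix[-1] + p)
--     n = len(primes)
--     cap = max_length if max_length else n
--     results = []
--     for start in range(n):
--         # closed-form window of admissible lengths; sums are monotone, so stop at first sum >= limit
--         for end in range(start + max(min_length, 1) - 1, min(n, start + cap)):
--             s = prefix[end + 1] - prefix[start]
--             if s >= limit:
--                 break
--             if s in prime_set:
--                 results.append((primes[start:end + 1], s))
--     return results
-- ===== Notes on version B (the rewrite author's own statement) =====
-- stated objective: alternative
-- what changed: B precomputes a set of the primes below limit (a prime window sum < limit is exactly a member of that list) so the per-pair trial-division primality test disappears, replaces the running accumulator by prefix sums, and enumerates for each start only the closed-form admissible index window instead of scanning with continue/break on length.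
import Mathlib
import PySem

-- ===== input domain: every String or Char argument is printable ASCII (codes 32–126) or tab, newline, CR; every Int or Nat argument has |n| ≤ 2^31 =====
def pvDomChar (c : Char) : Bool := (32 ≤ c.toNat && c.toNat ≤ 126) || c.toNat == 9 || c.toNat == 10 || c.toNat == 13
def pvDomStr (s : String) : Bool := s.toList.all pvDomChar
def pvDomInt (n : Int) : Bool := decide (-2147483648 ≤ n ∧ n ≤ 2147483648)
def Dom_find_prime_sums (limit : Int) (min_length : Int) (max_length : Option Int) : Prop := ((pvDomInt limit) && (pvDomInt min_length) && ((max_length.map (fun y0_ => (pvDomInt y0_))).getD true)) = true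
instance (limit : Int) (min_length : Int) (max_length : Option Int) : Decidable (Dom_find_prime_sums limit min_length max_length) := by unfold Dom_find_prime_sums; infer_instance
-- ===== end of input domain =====

-- B replaces A's per-pair trial-division primality test by one precomputed prime set
-- (a prime window sum < limit is exactly a member of the prime list) plus prefix sums
-- and a closed-form per-start index window; objective: alternative algorithm, same
-- overall cost (prime generation dominates both).

-- ===== PORT A =====
-- int(n ** 0.5): exact equal to Nat.sqrt for the 0 ≤ n ≤ 2^31 inputs Dom admits
-- (the double sqrt is correctly rounded there), ported as Nat.sqrt.
def py_isqrt (n : Int) : Int := (Nat.sqrt n.toNat : Int)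

-- is_prime: the module helper both A and B call (trial division up to isqrt(n));
-- the for-loop with early `return False` is the `.all` of its tests.
def is_prime (n : Int) : Bool :=
  if n < 2 then false
  else (PySem.List.pyRange 2 (py_isqrt n + 1) 1).all (fun i => !(PySem.Int.mod n i == 0))

-- A's inner `for end in range(start, len(primes))` with its break/continue,
-- carrying current_sum and results; primes[end] is always in range (getD 0 only totalizes).
def innerA (primes : List Int) (limit min_length : Int) (max_length : Option Int) (start : Int) :
    List Int → Int → List (List Int × Int) → List (List Int × Int)
  | [], _, res => res
  | e :: rest, cs, res =>
    let cs' := cs + ((PySem.List.pyGet? primes e).getD 0)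
    if limit ≤ cs' then res
    else if e - start + 1 < min_length then
      innerA primes limit min_length max_length start rest cs' res
    else if (match max_length with
             | some m => !(m == 0) && decide (m < e - start + 1)
             | none => false) then res
    else if is_prime cs' then
      innerA primes limit min_length max_length start rest cs'
        (res ++ [(PySem.List.slice primes (some start) (some (e + 1)), cs')])
    else innerA primes limit min_length max_length start rest cs' res

def find_prime_sums (limit : Int) (min_length : Int) (max_length : Option Int) : List (List Int × Int) :=
  let primes := (PySem.List.pyRange 2 limit 1).filter (fun n => is_prime n)
  (PySem.List.pyRange 0 (primes.length : Int) 1).foldl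
    (fun res start =>
      innerA primes limit min_length max_length start
        (PySem.List.pyRange start (primes.length : Int) 1) 0 res) []

-- ===== PORT B =====
-- cap = max_length if max_length else n  (Python truthiness: None and 0 mean "no cap")
def capB (max_length : Option Int) (n : Int) : Int :=
  match max_length with
  | some m => if m == 0 then n else m
  | none => n

-- B's inner loop: window sum from the prefix-sum list, primality by set membership.
def innerB (primes prefix_ : List Int) (limit : Int) (pset : PySem.Set Int) (start : Int) :
    List Int → List (List Int × Int) → List (List Int × Int)
  | [], res => res
  | e :: rest, res =>
    let s := ((PySem.List.pyGet? prefix_ (e + 1)).getD 0) - ((PySem.List.pyGet? prefix_ start).getD 0)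
    if limit ≤ s then res
    else if PySem.Set.contains pset s then
      innerB primes prefix_ limit pset start rest
        (res ++ [(PySem.List.slice primes (some start) (some (e + 1)), s)])
    else innerB primes prefix_ limit pset start rest res

def find_prime_sums_alt (limit : Int) (min_length : Int) (max_length : Option Int) : List (List Int × Int) :=
  let primes := (PySem.List.pyRange 2 limit 1).filter (fun n => is_prime n)
  let pset : PySem.Set Int := PySem.Set.ofList primes
  let prefix_ := primes.foldl (fun pre p => pre ++ [((PySem.List.pyGet? pre (-1)).getD 0) + p]) [0]
  let n : Int := primes.length
  let cap : Int := capB max_length n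
  (PySem.List.pyRange 0 n 1).foldl
    (fun res start =>
      innerB primes prefix_ limit pset start
        (PySem.List.pyRange (start + max min_length 1 - 1) (min n (start + cap)) 1) res) []

-- ===== PRECONDITION & SPEC =====
def Spec_find_prime_sums (limit : Int) (min_length : Int) (max_length : Option Int) (out : List (List Int × Int)) : Prop := out = find_prime_sums_alt limit min_length max_length
instance (limit : Int) (min_length : Int) (max_length : Option Int) (out : List (List Int × Int)) : Decidable (Spec_find_prime_sums limit min_length max_length out) := by unfold Spec_find_prime_sums; infer_instance

-- ===== CLAIM (what is proved, stated in full; the proofs are below) =====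
def Claim_equal_find_prime_sums : Prop := ∀ (limit : Int) (min_length : Int) (max_length : Option Int), Dom_find_prime_sums limit min_length max_length → Spec_find_prime_sums limit min_length max_length (find_prime_sums limit min_length max_length)

-- ===== LEMMAS AND PROOFS =====

-- prefix sums of the first a elements (proof-only abbreviation)
def SIfx (P : List Int) (a : Int) : Int := (P.take a.toNat).sum

-- the pair both loops append for window [start, e]
def outF (P : List Int) (start e : Int) : List Int × Int :=
  (PySem.List.slice P (some start) (some (e + 1)), SIfx P (e + 1) - SIfx P start)

-- B's record condition at index e
def okB (P : List Int) (limit start e : Int) : Bool :=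
  decide (SIfx P (e + 1) - SIfx P start < limit) && is_prime (SIfx P (e + 1) - SIfx P start)

def capOKf (max_length : Option Int) (len : Int) : Bool :=
  match max_length with
  | some m => (m == 0) || decide (len ≤ m)
  | none => true

-- A's record condition at index e
def okA (P : List Int) (limit min_length : Int) (max_length : Option Int) (start e : Int) : Bool :=
  decide (min_length ≤ e - start + 1) && capOKf max_length (e - start + 1) && okB P limit start e

theorem sum_take_mono {P : List Int} (hP : ∀ x ∈ P, 0 ≤ x) {i j : Nat} (h : i ≤ j) :
    (P.take i).sum ≤ (P.take j).sum := by
  induction P generalizing i j with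
  | nil => simp
  | cons p r ih =>
    cases i with
    | zero =>
      simp only [List.take_zero, List.sum_nil]
      have : ∀ x ∈ List.take j (p :: r), 0 ≤ x := fun x hx => hP x (List.mem_of_mem_take hx)
      exact List.sum_nonneg this
    | succ i' =>
      cases j with
      | zero => omega
      | succ j' =>
        simp only [List.take_succ_cons, List.sum_cons]
        have := ih (fun x hx => hP x (List.mem_cons_of_mem _ hx)) (Nat.succ_le_succ_iff.mp h)
        omega

theorem SIfx_mono {P : List Int} (hP : ∀ x ∈ P, 0 ≤ x) {a b : Int} (h : a ≤ b) :
    SIfx P a ≤ SIfx P b := by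
  unfold SIfx
  exact sum_take_mono hP (by omega)

theorem SIfx_succ {P : List Int} {e : Int} (h0 : 0 ≤ e) (hN : e < (P.length : Int)) :
    SIfx P (e + 1) = SIfx P e + P[e.toNat]'(by omega) := by
  unfold SIfx
  have h1 : (e + 1).toNat = e.toNat + 1 := by omega
  rw [h1]
  exact List.sum_take_succ P e.toNat (by omega)

theorem pyGet_of_lt {P : List Int} {e : Int} (h0 : 0 ≤ e) (hN : e < (P.length : Int)) :
    (PySem.List.pyGet? P e).getD 0 = P[e.toNat]'(by omega) := by
  rw [PySem.List.pyGet?_eq_some_getElem P h0 (by omega)]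
  rfl

-- partial sums helper used to characterise B's prefix-list fold
def psums (c : Int) : List Int → List Int
  | [] => []
  | p :: r => (c + p) :: psums (c + p) r

theorem fold_psums (l : List Int) : ∀ (acc : List Int) (c : Int),
    PySem.List.pyGet? acc (-1) = some c →
    l.foldl (fun pre p => pre ++ [((PySem.List.pyGet? pre (-1)).getD 0) + p]) acc
      = acc ++ psums c l := by
  induction l with
  | nil => intro acc c _; simp [psums]
  | cons p r ih =>
    intro acc c hc
    simp only [List.foldl_cons, hc, Option.getD_some]
    rw [ih (acc ++ [c + p]) (c + p) (PySem.List.pyGet?_neg_one_append_singleton acc (c + p))]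
    simp [psums]

theorem psums_eq_map (l : List Int) : ∀ (c : Int),
    psums c l = (List.range l.length).map (fun k => c + (l.take (k + 1)).sum) := by
  induction l with
  | nil => intro c; simp [psums]
  | cons p r ih =>
    intro c
    simp only [psums, List.length_cons, List.range_succ_eq_map, List.map_cons, List.map_map]
    refine List.cons_eq_cons.mpr ⟨by simp, ?_⟩
    rw [ih (c + p)]
    apply List.map_congr_left
    intro k _
    simp [List.take_succ_cons, List.sum_cons]
    ring

theorem prefix_lookup (P : List Int) {i : Int} (h0 : 0 ≤ i) (hN : i ≤ (P.length : Int)) :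
    (PySem.List.pyGet? (P.foldl (fun pre p => pre ++ [((PySem.List.pyGet? pre (-1)).getD 0) + p]) [0]) i).getD 0
      = SIfx P i := by
  rw [fold_psums P [0] 0 (by decide), psums_eq_map]
  rw [PySem.List.pyGet?_eq_some_getElem _ h0 (by simp; omega)]
  simp only [Option.getD_some]
  unfold SIfx
  rcases Nat.eq_zero_or_pos i.toNat with h | h
  · simp [h]
  · rw [List.getElem_append_right (by simp only [List.length_cons, List.length_nil]; omega)]
    simp only [List.getElem_map, List.getElem_range, List.length_cons, List.length_nil]
    have he : i.toNat - 1 + 1 = i.toNat := by omega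
    simp [he]

-- membership in the prime list
theorem mem_primes_iff (limit x : Int) :
    x ∈ (PySem.List.pyRange 2 limit 1).filter (fun n => is_prime n)
      ↔ (2 ≤ x ∧ x < limit) ∧ is_prime x = true := by
  rw [List.mem_filter, PySem.List.mem_pyRange_one]

-- window filter lemma: restricting an integer range by bounds IS the clipped range
theorem filter_window (u v : Int) : ∀ (n : Nat) (L R : Int), (R - L).toNat ≤ n →
    List.filter (fun e => decide (u ≤ e) && decide (e < v)) (PySem.List.pyRange L R 1)
      = PySem.List.pyRange (max L u) (min R v) 1 := by
  intro n
  induction n with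
  | zero =>
    intro L R h
    rw [PySem.List.pyRange_one_eq_nil (by omega), PySem.List.pyRange_one_eq_nil (by omega), List.filter_nil]
  | succ n ih =>
    intro L R h
    by_cases hl : L < R
    · rw [PySem.List.pyRange_one_cons hl, List.filter_cons]
      by_cases hu : u ≤ L
      · by_cases hv : L < v
        · rw [if_pos (by simp [hu, hv])]
          rw [ih (L + 1) R (by omega)]
          have h1 : max L u = L := by omega
          have h2 : max (L + 1) u = L + 1 := by omega
          rw [h1, h2, PySem.List.pyRange_one_cons (show L < min R v by omega)]
        · rw [if_neg (by simp [hv])]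
          rw [PySem.List.pyRange_one_eq_nil (show min R v ≤ max L u by omega)]
          rw [List.filter_eq_nil_iff.mpr]
          intro e he
          rw [PySem.List.mem_pyRange_one] at he
          simp only [Bool.and_eq_true, decide_eq_true_eq]
          omega
      · rw [if_neg (by simp [hu])]
        rw [ih (L + 1) R (by omega)]
        have h3 : max L u = max (L + 1) u := by omega
        rw [h3]
    · rw [PySem.List.pyRange_one_eq_nil (by omega), PySem.List.pyRange_one_eq_nil (by omega), List.filter_nil]

-- A's inner loop = append of the okA-filtered range, mapped through outF
theorem innerA_eq (P : List Int) (limit min_length : Int) (max_length : Option Int)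
    (start : Int) (hstart : 0 ≤ start) (hP : ∀ x ∈ P, 0 ≤ x) :
    ∀ (n : Nat) (a : Int), ((P.length : Int) - a).toNat ≤ n → start ≤ a →
    ∀ (res : List (List Int × Int)),
    innerA P limit min_length max_length start (PySem.List.pyRange a (P.length : Int) 1)
        (SIfx P a - SIfx P start) res
      = res ++ ((PySem.List.pyRange a (P.length : Int) 1).filter
          (okA P limit min_length max_length start)).map (outF P start) := by
  intro n
  induction n with
  | zero =>
    intro a h ha res
    rw [PySem.List.pyRange_one_eq_nil (by omega)]
    simp [innerA]
  | succ n ih =>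
    intro a h ha res
    by_cases hl : a < (P.length : Int)
    · rw [PySem.List.pyRange_one_cons hl, List.filter_cons]
      have hsum : SIfx P a - SIfx P start + (PySem.List.pyGet? P a).getD 0
          = SIfx P (a + 1) - SIfx P start := by
        rw [pyGet_of_lt (by omega) hl, SIfx_succ (by omega) hl]
        ring
      simp only [innerA, hsum]
      by_cases hb1 : limit ≤ SIfx P (a + 1) - SIfx P start
      · rw [if_pos hb1]
        have hok : okA P limit min_length max_length start a = false := by
          unfold okA okB
          simp [show ¬(SIfx P (a + 1) - SIfx P start < limit) by omega]
        have hnil : (PySem.List.pyRange (a + 1) (P.length : Int) 1).filter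
            (okA P limit min_length max_length start) = [] := by
          apply List.filter_eq_nil_iff.mpr
          intro e he
          rw [PySem.List.mem_pyRange_one] at he
          have hmono : SIfx P (a + 1) ≤ SIfx P (e + 1) := SIfx_mono hP (by omega)
          unfold okA okB
          simp [show ¬(SIfx P (e + 1) - SIfx P start < limit) by omega]
        rw [hok]
        simp [hnil]
      · rw [if_neg hb1]
        by_cases hb2 : a - start + 1 < min_length
        · rw [if_pos hb2]
          have hok : okA P limit min_length max_length start a = false := by
            unfold okA
            simp [show ¬(min_length ≤ a - start + 1) by omega]
          rw [hok, ih (a + 1) (by omega) (by omega) res]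
          simp
        · rw [if_neg hb2]
          cases max_length with
          | none =>
            rw [if_neg (by simp)]
            by_cases hb4 : is_prime (SIfx P (a + 1) - SIfx P start) = true
            · rw [if_pos hb4]
              have hok : okA P limit min_length none start a = true := by
                unfold okA okB capOKf
                simp [hb4, show min_length ≤ a - start + 1 by omega,
                  show SIfx P (a + 1) - SIfx P start < limit by omega]
              rw [hok, ih (a + 1) (by omega) (by omega)
                (res ++ [(PySem.List.slice P (some start) (some (a + 1)),
                  SIfx P (a + 1) - SIfx P start)])]
              simp [outF]
            · rw [if_neg hb4]
              have hok : okA P limit min_length none start a = false := by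
                unfold okA okB
                simp [hb4]
              rw [hok, ih (a + 1) (by omega) (by omega) res]
              simp
          | some m =>
            by_cases hb3 : (!(m == 0) && decide (m < a - start + 1)) = true
            · rw [if_pos hb3]
              simp only [Bool.and_eq_true, Bool.not_eq_true', beq_eq_false_iff_ne,
                decide_eq_true_eq] at hb3
              have hcapall : ∀ e : Int, a ≤ e → capOKf (some m) (e - start + 1) = false := by
                intro e hee
                unfold capOKf
                simp only [Bool.or_eq_false_iff, beq_eq_false_iff_ne, decide_eq_false_iff_not]
                exact ⟨hb3.1, by omega⟩
              have hok : okA P limit min_length (some m) start a = false := by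
                unfold okA
                simp [hcapall a le_rfl]
              have hnil : (PySem.List.pyRange (a + 1) (P.length : Int) 1).filter
                  (okA P limit min_length (some m) start) = [] := by
                apply List.filter_eq_nil_iff.mpr
                intro e he
                rw [PySem.List.mem_pyRange_one] at he
                unfold okA
                simp [hcapall e (by omega)]
              rw [hok]
              simp [hnil]
            · rw [if_neg hb3]
              have hcap : capOKf (some m) (a - start + 1) = true := by
                simp only [Bool.and_eq_true, Bool.not_eq_true', beq_eq_false_iff_ne,
                  decide_eq_true_eq, not_and] at hb3
                unfold capOKf
                simp only [Bool.or_eq_true, beq_iff_eq, decide_eq_true_eq]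
                by_cases hm : m = 0
                · exact Or.inl hm
                · exact Or.inr (by have := hb3 hm; omega)
              by_cases hb4 : is_prime (SIfx P (a + 1) - SIfx P start) = true
              · rw [if_pos hb4]
                have hok : okA P limit min_length (some m) start a = true := by
                  unfold okA okB
                  simp [hb4, hcap, show min_length ≤ a - start + 1 by omega,
                    show SIfx P (a + 1) - SIfx P start < limit by omega]
                rw [hok, ih (a + 1) (by omega) (by omega)
                  (res ++ [(PySem.List.slice P (some start) (some (a + 1)),
                    SIfx P (a + 1) - SIfx P start)])]
                simp [outF]
              · rw [if_neg hb4]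
                have hok : okA P limit min_length (some m) start a = false := by
                  unfold okA okB
                  simp [hb4]
                rw [hok, ih (a + 1) (by omega) (by omega) res]
                simp
    · rw [PySem.List.pyRange_one_eq_nil (by omega)]
      simp [innerA]

theorem innerB_eq (P : List Int) (limit : Int) (start : Int)
    (hstart : 0 ≤ start) (hP : ∀ x ∈ P, 2 ≤ x)
    (pfx : List Int)
    (hpfx : ∀ i : Int, 0 ≤ i → i ≤ (P.length : Int) → (PySem.List.pyGet? pfx i).getD 0 = SIfx P i)
    (pset : PySem.Set Int)
    (hpset : ∀ s : Int, 2 ≤ s → s < limit → (PySem.Set.contains pset s = is_prime s)) :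
    ∀ (n : Nat) (a b : Int), (b - a).toNat ≤ n → start ≤ a → b ≤ (P.length : Int) →
    ∀ (res : List (List Int × Int)),
    innerB P pfx limit pset start (PySem.List.pyRange a b 1) res
      = res ++ ((PySem.List.pyRange a b 1).filter (okB P limit start)).map (outF P start) := by
  have hP0 : ∀ x ∈ P, 0 ≤ x := fun x hx => le_trans (by norm_num) (hP x hx)
  intro n
  induction n with
  | zero =>
    intro a b h ha hb res
    rw [PySem.List.pyRange_one_eq_nil (by omega)]
    simp [innerB]
  | succ n ih =>
    intro a b h ha hb res
    by_cases hl : a < b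
    · rw [PySem.List.pyRange_one_cons hl, List.filter_cons]
      have hs1 : (PySem.List.pyGet? pfx (a + 1)).getD 0 = SIfx P (a + 1) :=
        hpfx (a + 1) (by omega) (by omega)
      have hs2 : (PySem.List.pyGet? pfx start).getD 0 = SIfx P start :=
        hpfx start hstart (by omega)
      simp only [innerB, hs1, hs2]
      by_cases hb1 : limit ≤ SIfx P (a + 1) - SIfx P start
      · rw [if_pos hb1]
        have hok : okB P limit start a = false := by
          unfold okB
          simp [show ¬(SIfx P (a + 1) - SIfx P start < limit) by omega]
        have hnil : (PySem.List.pyRange (a + 1) b 1).filter (okB P limit start) = [] := by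
          apply List.filter_eq_nil_iff.mpr
          intro e he
          rw [PySem.List.mem_pyRange_one] at he
          have hmono : SIfx P (a + 1) ≤ SIfx P (e + 1) := SIfx_mono hP0 (by omega)
          unfold okB
          simp [show ¬(SIfx P (e + 1) - SIfx P start < limit) by omega]
        rw [hok]
        simp [hnil]
      · rw [if_neg hb1]
        have hstartlt : start < (P.length : Int) := by omega
        have h2s : 2 ≤ SIfx P (a + 1) - SIfx P start := by
          have h1 : SIfx P (start + 1) = SIfx P start + P[start.toNat]'(by omega) :=
            SIfx_succ hstart hstartlt
          have h2 : SIfx P (start + 1) ≤ SIfx P (a + 1) := SIfx_mono hP0 (by omega)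
          have h3 : 2 ≤ P[start.toNat]'(by omega) := hP _ (List.getElem_mem _)
          omega
        have hcont : PySem.Set.contains pset (SIfx P (a + 1) - SIfx P start)
            = is_prime (SIfx P (a + 1) - SIfx P start) := hpset _ h2s (by omega)
        by_cases hb4 : is_prime (SIfx P (a + 1) - SIfx P start) = true
        · rw [if_pos (by rw [hcont]; exact hb4)]
          have hok : okB P limit start a = true := by
            unfold okB
            simp [hb4, show SIfx P (a + 1) - SIfx P start < limit by omega]
          rw [hok, ih (a + 1) b (by omega) (by omega) hb
            (res ++ [(PySem.List.slice P (some start) (some (a + 1)),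
              SIfx P (a + 1) - SIfx P start)])]
          simp [outF]
        · rw [if_neg (by rw [hcont]; exact hb4)]
          have hok : okB P limit start a = false := by
            unfold okB
            simp [hb4]
          rw [hok, ih (a + 1) b (by omega) (by omega) hb res]
          simp
    · rw [PySem.List.pyRange_one_eq_nil (by omega)]
      simp [innerB]

-- the two filtered ranges coincide
theorem filters_eq (P : List Int) (limit min_length : Int) (max_length : Option Int)
    (start : Int) (cap : Int)
    (hcap : ∀ e : Int, start ≤ e → e < (P.length : Int) →
      (capOKf max_length (e - start + 1) = true ↔ e < start + cap)) :
    ((PySem.List.pyRange start (P.length : Int) 1).filter (okA P limit min_length max_length start)).map (outF P start)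
      = ((PySem.List.pyRange (start + max min_length 1 - 1)
            (min (P.length : Int) (start + cap)) 1).filter (okB P limit start)).map (outF P start) := by
  congr 1
  have hcong : ∀ e ∈ PySem.List.pyRange start (P.length : Int) 1,
      okA P limit min_length max_length start e
        = (okB P limit start e &&
            (decide (start + max min_length 1 - 1 ≤ e) &&
             decide (e < min (P.length : Int) (start + cap)))) := by
    intro e he
    rw [PySem.List.mem_pyRange_one] at he
    have e1 : decide (min_length ≤ e - start + 1)
        = decide (start + max min_length 1 - 1 ≤ e) := decide_eq_decide.mpr (by omega)
    have e2 : capOKf max_length (e - start + 1)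
        = decide (e < min (P.length : Int) (start + cap)) := by
      cases hc : capOKf max_length (e - start + 1) with
      | false =>
        have hnot : ¬ (e < start + cap) := fun hlt => by
          rw [(hcap e he.1 he.2).mpr hlt] at hc
          exact Bool.true_eq_false.mp hc
        exact (decide_eq_false (by omega)).symm
      | true =>
        have hlt : e < start + cap := (hcap e he.1 he.2).mp hc
        exact (decide_eq_true (by omega)).symm
    unfold okA
    rw [e1, e2]
    cases okB P limit start e <;>
      cases hd1 : decide (start + max min_length 1 - 1 ≤ e) <;>
        cases hd2 : decide (e < min (P.length : Int) (start + cap)) <;>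
          simp
  rw [List.filter_congr hcong, ← List.filter_filter,
    filter_window (start + max min_length 1 - 1) (min (P.length : Int) (start + cap))
      ((P.length : Int) - start).toNat start (P.length : Int) le_rfl]
  have hmax : max start (start + max min_length 1 - 1) = start + max min_length 1 - 1 := by
    omega
  have hmin : min (P.length : Int) (min (P.length : Int) (start + cap))
      = min (P.length : Int) (start + cap) := by omega
  rw [hmax, hmin]

-- ===== VERDICT (by name: the statement is the Claim_ definition above) =====
theorem find_prime_sums_spec : Claim_equal_find_prime_sums := by
  intro limit min_length max_length _
  unfold Spec_find_prime_sums find_prime_sums find_prime_sums_alt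
  dsimp only
  apply PySem.List.foldl_congr_mem
  intro res start hmem
  rw [PySem.List.mem_pyRange_one] at hmem
  set P : List Int := (PySem.List.pyRange 2 limit 1).filter (fun n => is_prime n) with hPdef
  have hP2 : ∀ x ∈ P, 2 ≤ x := fun x hx => ((mem_primes_iff limit x).mp hx).1.1
  have hP0 : ∀ x ∈ P, 0 ≤ x := fun x hx => le_trans (by norm_num) (hP2 x hx)
  have hpset : ∀ s : Int, 2 ≤ s → s < limit →
      (PySem.Set.contains (PySem.Set.ofList P) s = is_prime s) := by
    intro s h2 hlt
    by_cases hp : is_prime s = true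
    · rw [hp]
      exact (PySem.Set.contains_iff _ _).mpr
        ((PySem.Set.mem_ofList _ _).mpr ((mem_primes_iff limit s).mpr ⟨⟨h2, hlt⟩, hp⟩))
    · have hnm : ¬ s ∈ PySem.Set.ofList P := fun hm =>
        hp ((mem_primes_iff limit s).mp ((PySem.Set.mem_ofList _ _).mp hm)).2
      rw [Bool.eq_false_iff.mpr hp,
        Bool.eq_false_iff.mpr (fun h => hnm ((PySem.Set.contains_iff _ _).mp h))]
  have hA := innerA_eq P limit min_length max_length start hmem.1 hP0
    (((P.length : Int) - start).toNat) start le_rfl le_rfl res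
  rw [sub_self] at hA
  have hcap : ∀ e : Int, start ≤ e → e < (P.length : Int) →
      (capOKf max_length (e - start + 1) = true ↔
        e < start + capB max_length (P.length : Int)) := by
    intro e h1 h2
    cases max_length with
    | none =>
      simp only [capOKf, capB, true_iff]
      omega
    | some m =>
      by_cases hm : m = 0
      · subst hm
        simp only [capOKf, capB, beq_self_eq_true, Bool.true_or,
          if_true, true_iff]
        omega
      · have hb : ((m == 0) : Bool) = false := by simpa using hm
        simp only [capOKf, capB, hb, Bool.false_or, Bool.false_eq_true, if_false,
          decide_eq_true_eq]
        omega
  have hB := innerB_eq P limit start hmem.1 hP2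
    (P.foldl (fun pre p => pre ++ [((PySem.List.pyGet? pre (-1)).getD 0) + p]) [0])
    (fun i h0 hN => prefix_lookup P h0 hN)
    (PySem.Set.ofList P) hpset
    ((min (P.length : Int) (start + capB max_length (P.length : Int))
        - (start + max min_length 1 - 1)).toNat)
    (start + max min_length 1 - 1)
    (min (P.length : Int) (start + capB max_length (P.length : Int)))
    le_rfl (by omega) (min_le_left _ _) res
  rw [hA, hB, filters_eq P limit min_length max_length start _ hcap]
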